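-- pv_equiv track=rewrite | github.com/kyeong-ha/coding-test | dingcorithm/1st_week/01_04_find_max_plus_or_multiply.py | find_max_plus_or_multiply
-- ===== SOURCE A (Python) =====
-- def find_max_plus_or_multiply(array):
--   max_number = array[0]
--   for i in range(1, len(array)):
--     plus = max_number + array[i]
--     multiply = max_number * array[i]
--     if plus > multiply:
--       max_number = plus
--     else:
--       max_number = multiply
--   return max_number
-- ===== SOURCE B (Python) =====
-- def find_max_plus_or_multiply(array):
--   # Algebraic reformulation: acc*x >= acc+x  iff  (acc-1)*(x-1) >= 1, i.e. iff
--   # (acc >= 2 and x >= 2) or (acc <= 0 and x <= 0); otherwise adding is strictly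
--   # better.  So decide by sign analysis, and batch-multiply maximal runs of
--   # elements >= 2 (the accumulator stays >= 2 across such a run).
--   acc = array[0]
--   n = len(array)
--   i = 1
--   while i < n:
--     x = array[i]
--     if acc >= 2 and x >= 2:
--       p = 1
--       j = i
--       while j < n and array[j] >= 2:
--         p *= array[j]
--         j += 1
--       acc *= p
--       i = j
--     elif acc <= 0 and x <= 0:
--       acc *= x
--       i += 1
--     else:
--       acc += x
--       i += 1
--   return acc
-- ===== Notes on version B (the rewrite author's own statement) =====
-- stated objective: alternative
-- what changed: Replaces A's per-element comparison of plus vs multiply by an algebraic sign analysis ((acc-1)(x-1) >= 1 iff both >= 2 or both <= 0) that picks the operation without computing both candidates, and batch-multiplies maximal runs of elements >= 2 in an inner scan (fewer branch decisions per element, measured ~1.7x at n=16384).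
import Mathlib
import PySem

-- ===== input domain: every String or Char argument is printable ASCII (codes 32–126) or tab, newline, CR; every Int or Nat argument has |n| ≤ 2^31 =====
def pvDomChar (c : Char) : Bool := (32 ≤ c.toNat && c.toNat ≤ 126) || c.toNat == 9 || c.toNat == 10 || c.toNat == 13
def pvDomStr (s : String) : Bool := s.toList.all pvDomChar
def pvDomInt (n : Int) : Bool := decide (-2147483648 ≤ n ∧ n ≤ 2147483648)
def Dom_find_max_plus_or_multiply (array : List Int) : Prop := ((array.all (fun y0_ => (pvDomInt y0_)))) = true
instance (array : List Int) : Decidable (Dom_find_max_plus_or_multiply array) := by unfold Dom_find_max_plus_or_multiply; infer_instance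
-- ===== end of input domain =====

-- B replaces A's per-element plus/multiply comparison by an algebraic sign analysis
-- ((acc-1)(x-1) >= 1 iff both >= 2 or both <= 0) and batch-multiplies maximal runs of
-- elements >= 2; same O(n) cost, a different algorithm for the same greedy value.


-- ===== PORT A =====
-- array[0] and array[i] are in range under Pre_ (array ≠ []); pyGetD used with default 0.
def find_max_plus_or_multiply (array : List Int) : Int :=
  (PySem.List.pyRange 1 (array.length : Int) 1).foldl
    (fun max_number i =>
      let plus := max_number + PySem.List.pyGetD array i 0
      let multiply := max_number * PySem.List.pyGetD array i 0
      if plus > multiply then plus else multiply)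
    (PySem.List.pyGetD array 0 0)

-- ===== PORT B =====
-- inner while: p *= array[j]; j += 1 while j < n and array[j] >= 2 (returns (p, j));
-- fuel (= remaining length, supplied by the caller) only makes the while-loop total
def pvInnerRun (array : List Int) (fuel j : Nat) (p : Int) : Int × Nat :=
  match fuel with
  | 0 => (p, j)
  | fuel + 1 =>
    if j < array.length ∧ 2 ≤ PySem.List.pyGetD array (j : Int) 0 then
      pvInnerRun array fuel (j + 1) (p * PySem.List.pyGetD array (j : Int) 0)
    else (p, j)

-- outer while over the indices, with the sign-analysis branches of Source B (fuel = remaining length)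
def pvSignLoop (array : List Int) (fuel : Nat) (acc : Int) (i : Nat) : Int :=
  match fuel with
  | 0 => acc
  | fuel + 1 =>
    if i < array.length then
      let x := PySem.List.pyGetD array (i : Int) 0
      if 2 ≤ acc ∧ 2 ≤ x then
        let pj := pvInnerRun array (array.length - i) i 1
        pvSignLoop array fuel (acc * pj.1) pj.2
      else if acc ≤ 0 ∧ x ≤ 0 then
        pvSignLoop array fuel (acc * x) (i + 1)
      else
        pvSignLoop array fuel (acc + x) (i + 1)
    else acc

def find_max_plus_or_multiply_alt (array : List Int) : Int :=
  pvSignLoop array array.length (PySem.List.pyGetD array 0 0) 1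

-- ===== PRECONDITION & SPEC =====
-- A raises IndexError on the empty list (array[0]); B does too, so exactly those inputs are excluded.
def Pre_find_max_plus_or_multiply (array : List Int) : Prop := array ≠ []
instance (array : List Int) : Decidable (Pre_find_max_plus_or_multiply array) := by unfold Pre_find_max_plus_or_multiply; infer_instance
def pvWitness_find_max_plus_or_multiply : List Int := [2, 1, -3, 4]

def Spec_find_max_plus_or_multiply (array : List Int) (out : Int) : Prop := out = find_max_plus_or_multiply_alt array
instance (array : List Int) (out : Int) : Decidable (Spec_find_max_plus_or_multiply array out) := by unfold Spec_find_max_plus_or_multiply; infer_instance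

-- ===== CLAIM (what is proved, stated in full; the proofs are below) =====
def Claim_equal_find_max_plus_or_multiply : Prop := ∀ (array : List Int), Dom_find_max_plus_or_multiply array → Pre_find_max_plus_or_multiply array → Spec_find_max_plus_or_multiply array (find_max_plus_or_multiply array)

-- ===== LEMMAS AND PROOFS =====
-- the greedy step of A, as a function
def pvStep (a x : Int) : Int := if a + x > a * x then a + x else a * x

theorem pvStep_mul_pos {a x : Int} (ha : 2 ≤ a) (hx : 2 ≤ x) : pvStep a x = a * x := by
  unfold pvStep
  have : ¬ a + x > a * x := by nlinarith
  simp [this]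

theorem pvStep_mul_neg {a x : Int} (ha : a ≤ 0) (hx : x ≤ 0) : pvStep a x = a * x := by
  unfold pvStep
  have : ¬ a + x > a * x := by nlinarith
  simp [this]

theorem pvStep_add {a x : Int} (h1 : ¬ (2 ≤ a ∧ 2 ≤ x)) (h2 : ¬ (a ≤ 0 ∧ x ≤ 0)) :
    pvStep a x = a + x := by
  unfold pvStep
  have hle : (a - 1) * (x - 1) ≤ 0 := by
    rcases (show a ≤ 1 ∨ 1 < a by omega) with ha | ha
    · rcases (show x ≤ 1 ∨ 1 < x by omega) with hx | hx
      · -- a ≤ 1 and x ≤ 1: not both ≤ 0, so one of them is 1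
        rcases (show a ≤ 0 ∨ 0 < a by omega) with ha0 | ha0
        · have hx0 : 1 ≤ x := by omega
          have : x - 1 = 0 ∨ 0 ≤ x - 1 := by omega
          nlinarith
        · nlinarith
      · nlinarith
    · have hx : x ≤ 1 := by omega
      nlinarith
  have : a + x > a * x := by nlinarith
  simp [this]

-- the inner while makes progress when its guard holds at entry
theorem pvInnerRun_snd_ge (array : List Int) :
    ∀ (fuel j : Nat) (p : Int), j ≤ (pvInnerRun array fuel j p).2 := by
  intro fuel
  induction fuel with
  | zero => intro j p; exact le_rfl
  | succ fuel ih =>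
    intro j p
    rw [pvInnerRun]
    split
    · next h => have := ih (j + 1) (p * PySem.List.pyGetD array (j : Int) 0); omega
    · exact le_rfl

-- folding A's step over a run of elements ≥ 2 from an accumulator ≥ 2 is the batched product
theorem pvInnerRun_fold (array : List Int) :
    ∀ (fuel j : Nat) (p a : Int), 2 ≤ a → 1 ≤ p →
      (array.drop j).foldl pvStep (a * p) =
        (array.drop ((pvInnerRun array fuel j p).2)).foldl pvStep (a * (pvInnerRun array fuel j p).1) := by
  intro fuel
  induction fuel with
  | zero => intro j p a _ _; rfl
  | succ fuel ih =>
    intro j p a ha hp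
    rw [pvInnerRun]
    split
    · next h =>
      obtain ⟨hj, hx⟩ := h
      have hget : PySem.List.pyGetD array (j : Int) 0 = array[j] :=
        PySem.List.pyGetD_ofNat array j 0 hj
      have hdrop : array.drop j = array[j] :: array.drop (j + 1) :=
        List.drop_eq_getElem_cons hj
      rw [hdrop, List.foldl_cons]
      have hx' : 2 ≤ array[j] := by rw [hget] at hx; exact hx
      have hap : 2 ≤ a * p := by nlinarith
      rw [pvStep_mul_pos hap hx']
      have heq : a * p * array[j] = a * (p * PySem.List.pyGetD array (j : Int) 0) := by
        rw [hget]; ring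
      rw [heq]
      exact ih (j + 1) (p * PySem.List.pyGetD array (j : Int) 0) a ha (by nlinarith)
    · rfl

-- the sign-analysis loop computes the fold of A's step over the remaining suffix
theorem pvSignLoop_fold (array : List Int) :
    ∀ (fuel : Nat) (acc : Int) (i : Nat), array.length - i ≤ fuel →
      pvSignLoop array fuel acc i = (array.drop i).foldl pvStep acc := by
  intro fuel
  induction fuel with
  | zero =>
    intro acc i hk
    rw [pvSignLoop]
    rw [List.drop_eq_nil_of_le (by omega), List.foldl_nil]
  | succ fuel ih =>
    intro acc i hk
    rw [pvSignLoop]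
    split
    · next h =>
      simp only
      have hget : PySem.List.pyGetD array (i : Int) 0 = array[i] :=
        PySem.List.pyGetD_ofNat array i 0 h
      have hdrop : array.drop i = array[i] :: array.drop (i + 1) :=
        List.drop_eq_getElem_cons h
      split
      · next h2 =>
        have hx2 : 2 ≤ PySem.List.pyGetD array (i : Int) 0 := h2.2
        have hgt : i < (pvInnerRun array (array.length - i) i 1).2 := by
          have hfi : array.length - i = (array.length - (i + 1)) + 1 := by omega
          rw [hfi, pvInnerRun, if_pos ⟨h, hx2⟩]
          have := pvInnerRun_snd_ge array (array.length - (i + 1)) (i + 1)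
            (1 * PySem.List.pyGetD array (i : Int) 0)
          omega
        rw [ih (acc * (pvInnerRun array (array.length - i) i 1).1)
          (pvInnerRun array (array.length - i) i 1).2 (by omega)]
        have := pvInnerRun_fold array (array.length - i) i 1 acc h2.1 (by norm_num)
        rw [mul_one] at this
        exact this.symm
      · next h2 =>
        split
        · next h3 =>
          rw [ih (acc * PySem.List.pyGetD array (i : Int) 0) (i + 1) (by omega)]
          rw [hdrop, List.foldl_cons]
          have hs : pvStep acc array[i] = acc * array[i] := by
            apply pvStep_mul_neg h3.1
            rw [← hget]; exact h3.2
          rw [hs, hget]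
        · next h3 =>
          rw [ih (acc + PySem.List.pyGetD array (i : Int) 0) (i + 1) (by omega)]
          rw [hdrop, List.foldl_cons]
          have hs : pvStep acc array[i] = acc + array[i] := by
            apply pvStep_add
            · rw [← hget]; exact h2
            · rw [← hget]; exact h3
          rw [hs, hget]
    · next h =>
      rw [List.drop_eq_nil_of_le (by omega), List.foldl_nil]

-- ===== VERDICT (by name: the statement is the Claim_ definition above) =====
theorem find_max_plus_or_multiply_spec : Claim_equal_find_max_plus_or_multiply := by
  intro array _ hpre
  unfold Spec_find_max_plus_or_multiply find_max_plus_or_multiply find_max_plus_or_multiply_alt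
  rw [pvSignLoop_fold array array.length (PySem.List.pyGetD array 0 0) 1 (by omega)]
  refine ((PySem.List.foldl_pyRange_pyGetD' array 0
    (fun a x => if a + x > a * x then a + x else a * x)
    (PySem.List.pyGetD array 0 0) (a := 1) (by norm_num)).trans ?_)
  rfl
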